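-- pv_equiv track=rewrite | github.com/monaya37/DSP-Tasks | functions.py | add_signals
-- ===== SOURCE A (Python) =====
-- def add_signals(signal_a, signal_b):
--     combined = {}
--
--     # Add values from the first signal
--     for index, value in signal_a[2].items():
--         combined[index] = value
--
--     # Add values from the second signal
--     for index, value in signal_b[2].items():
--         if index in combined:
--             combined[index] += value  # Sum the values for overlapping keys
--         else:
--             combined[index] = value  # Add new key-value pairs
--
--     combined = dict(sorted(combined.items()))
--     indices = list(combined.keys())
--     values = list(combined.values())
--     return indices, values, combined
-- ===== SOURCE B (Python) =====
-- def add_signals(signal_a, signal_b):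
--     # Merge-by-sorting: concatenate both (index, value) item lists, sort the pairs,
--     # then one linear scan merges adjacent entries with equal index by summing.
--     pairs = sorted(list(signal_a[2].items()) + list(signal_b[2].items()))
--     items = []
--     for k, v in pairs:
--         if items and items[-1][0] == k:
--             items[-1] = (k, items[-1][1] + v)
--         else:
--             items.append((k, v))
--     indices = [k for k, _ in items]
--     values = [v for _, v in items]
--     return indices, values, dict(items)
-- ===== Notes on version B (the rewrite author's own statement) =====
-- stated objective: alternative
-- what changed: Instead of A's dict-merge (copy dict_a, branch-merge dict_b into it, then sort the merged items), B concatenates both item lists, sorts the pairs, and merges adjacent equal-index entries in one linear scan with no dict lookups; the dict is only materialised at the end.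
import Mathlib
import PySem

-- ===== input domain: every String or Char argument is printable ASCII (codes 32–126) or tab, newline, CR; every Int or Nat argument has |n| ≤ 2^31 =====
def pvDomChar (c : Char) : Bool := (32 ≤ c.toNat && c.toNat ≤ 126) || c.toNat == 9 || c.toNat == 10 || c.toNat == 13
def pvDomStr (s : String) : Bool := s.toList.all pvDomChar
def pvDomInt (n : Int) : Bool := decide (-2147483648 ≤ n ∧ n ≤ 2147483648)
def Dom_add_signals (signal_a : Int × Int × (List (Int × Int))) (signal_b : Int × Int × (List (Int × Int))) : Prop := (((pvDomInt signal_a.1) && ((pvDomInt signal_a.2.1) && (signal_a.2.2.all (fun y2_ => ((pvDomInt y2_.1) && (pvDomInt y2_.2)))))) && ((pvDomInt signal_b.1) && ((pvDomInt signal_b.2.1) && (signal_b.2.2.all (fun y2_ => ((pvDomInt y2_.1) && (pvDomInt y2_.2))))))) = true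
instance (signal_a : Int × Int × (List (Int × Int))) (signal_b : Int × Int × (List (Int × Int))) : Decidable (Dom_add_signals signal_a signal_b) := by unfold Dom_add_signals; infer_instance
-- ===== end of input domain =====

-- B replaces A's dict-merge (copy dict_a, branch-merge dict_b, then sort the merged items) by
-- sorting the concatenation of both item lists and merging adjacent equal-index pairs in one
-- linear scan without dict lookups (objective: alternative).

-- ===== PORT A =====
-- loop body of A's second loop: 'if index in combined: combined[index] += value else: combined[index] = value'
-- (the modify default 0 is irrelevant: the key is present in the modify branch)
def pvMergeStep (d : PySem.Dict Int Int) (p : Int × Int) : PySem.Dict Int Int :=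
  if d.contains p.1 then d.modify p.1 0 (· + p.2) else d.insert p.1 p.2

def add_signals (signal_a : Int × Int × (List (Int × Int))) (signal_b : Int × Int × (List (Int × Int))) : List Int × List Int × (List (Int × Int)) :=
  -- combined = {}; for index, value in signal_a[2].items(): combined[index] = value
  let combined : PySem.Dict Int Int :=
    signal_a.2.2.foldl (fun d p => d.insert p.1 p.2) PySem.Dict.empty
  -- for index, value in signal_b[2].items(): …
  let combined := signal_b.2.2.foldl pvMergeStep combined
  -- combined = dict(sorted(combined.items()))  (tuples sort lexicographically)
  let combined2 : PySem.Dict Int Int :=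
    PySem.Dict.ofList (PySem.List.sorted2 combined.items (·.1) (·.2))
  (combined2.keys, combined2.values, combined2.items)

-- ===== PORT B =====
-- loop body of B's scan: 'if items and items[-1][0] == k: items[-1] = (k, items[-1][1] + v) else: items.append((k, v))'
def pvScanStep (acc : List (Int × Int)) (p : Int × Int) : List (Int × Int) :=
  match acc.getLast? with
  | some q => if q.1 == p.1 then acc.dropLast ++ [(p.1, q.2 + p.2)] else acc ++ [p]
  | none => acc ++ [p]

def add_signals_alt (signal_a : Int × Int × (List (Int × Int))) (signal_b : Int × Int × (List (Int × Int))) : List Int × List Int × (List (Int × Int)) :=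
  -- pairs = sorted(list(signal_a[2].items()) + list(signal_b[2].items()))
  let pairs : List (Int × Int) := PySem.List.sorted2 (signal_a.2.2 ++ signal_b.2.2) (·.1) (·.2) false
  -- items = []; for k, v in pairs: …
  let items : List (Int × Int) := pairs.foldl pvScanStep []
  -- return [k for k, _ in items], [v for _, v in items], dict(items)
  (items.map (·.1), items.map (·.2), (PySem.Dict.ofList items).items)

-- ===== PRECONDITION & SPEC =====
-- The dict arguments signal_*[2] arrive as association lists; a list with duplicate indices does not
-- encode any Python dict (dict keys are unique), so such lists are excluded.
def Pre_add_signals (signal_a : Int × Int × (List (Int × Int))) (signal_b : Int × Int × (List (Int × Int))) : Prop :=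
  (signal_a.2.2.map (·.1)).Nodup ∧ (signal_b.2.2.map (·.1)).Nodup
instance (signal_a : Int × Int × (List (Int × Int))) (signal_b : Int × Int × (List (Int × Int))) : Decidable (Pre_add_signals signal_a signal_b) := by unfold Pre_add_signals; infer_instance

def pvWitness_add_signals : (Int × Int × (List (Int × Int))) × (Int × Int × (List (Int × Int))) :=
  ((0, 0, [(1, 5)]), (0, 0, [(1, 2), (0, 3)]))

def Spec_add_signals (signal_a : Int × Int × (List (Int × Int))) (signal_b : Int × Int × (List (Int × Int))) (out : List Int × List Int × (List (Int × Int))) : Prop := out = add_signals_alt signal_a signal_b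
instance (signal_a : Int × Int × (List (Int × Int))) (signal_b : Int × Int × (List (Int × Int))) (out : List Int × List Int × (List (Int × Int))) : Decidable (Spec_add_signals signal_a signal_b out) := by unfold Spec_add_signals; infer_instance

-- ===== CLAIM (what is proved, stated in full; the proofs are below) =====
def Claim_equal_add_signals : Prop := ∀ (signal_a : Int × Int × (List (Int × Int))) (signal_b : Int × Int × (List (Int × Int))), Dom_add_signals signal_a signal_b → Pre_add_signals signal_a signal_b → Spec_add_signals signal_a signal_b (add_signals signal_a signal_b)

-- ===== LEMMAS AND PROOFS =====

-- the value a key k contributes from an association list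
def pvSumIf (l : List (Int × Int)) (k : Int) : Int :=
  (l.map (fun p => if k = p.1 then p.2 else 0)).sum

lemma pvSumIf_append (l1 l2 : List (Int × Int)) (k : Int) :
    pvSumIf (l1 ++ l2) k = pvSumIf l1 k + pvSumIf l2 k := by
  simp [pvSumIf]

lemma pvSumIf_perm {l l' : List (Int × Int)} (h : l.Perm l') (k : Int) :
    pvSumIf l k = pvSumIf l' k :=
  (h.map _).sum_eq

lemma pvMergeStep_getD (d : PySem.Dict Int Int) (p : Int × Int) (k : Int) :
    (pvMergeStep d p).getD k 0 = d.getD k 0 + (if k = p.1 then p.2 else 0) := by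
  unfold pvMergeStep
  by_cases h : d.contains p.1
  · simp [h, PySem.Dict.getD_modify]
    split_ifs with hk <;> simp [hk]
  · have h' : d.contains p.1 = false := by simpa using h
    simp [h', PySem.Dict.getD_insert]
    split_ifs with hk
    · subst hk; simp [PySem.Dict.getD_of_not_contains d 0 h']
    · simp

lemma pvMerge_foldl_getD (l : List (Int × Int)) (d : PySem.Dict Int Int) (k : Int) :
    (l.foldl pvMergeStep d).getD k 0 = d.getD k 0 + pvSumIf l k := by
  induction l generalizing d with
  | nil => simp [pvSumIf]
  | cons p t ih =>
      simp only [List.foldl_cons, ih, pvMergeStep_getD, pvSumIf, List.map_cons, List.sum_cons]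
      ring

lemma pvSumIf_eq_zero_of_not_mem (l : List (Int × Int)) (k : Int) (h : k ∉ l.map (·.1)) :
    pvSumIf l k = 0 := by
  induction l with
  | nil => simp [pvSumIf]
  | cons p t ih =>
      simp only [List.map_cons, List.mem_cons, not_or] at h
      simp only [pvSumIf, List.map_cons, List.sum_cons] at ih ⊢
      rw [if_neg h.1, zero_add]
      exact ih h.2

lemma pvMk_getD (l : List (Int × Int)) (k : Int) (h : (l.map (·.1)).Nodup) :
    (PySem.Dict.mk l).getD k 0 = pvSumIf l k := by
  induction l with
  | nil => simp [pvSumIf, PySem.Dict.getD_eq_get?_getD, PySem.Dict.get?]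
  | cons p t ih =>
      obtain ⟨i, v⟩ := p
      simp only [List.map_cons, List.nodup_cons] at h
      by_cases hk : k = i
      · subst hk
        have hz : pvSumIf t k = 0 := pvSumIf_eq_zero_of_not_mem t k (by simpa using h.1)
        simp only [pvSumIf] at hz ⊢
        simp [PySem.Dict.getD_eq_get?_getD, PySem.Dict.get?_mk_cons, hz]
      · have hih := ih h.2
        simp only [pvSumIf, PySem.Dict.getD_eq_get?_getD] at hih ⊢
        simp [PySem.Dict.get?_mk_cons, Ne.symm hk, hk, hih]

lemma pvMergeStep_keys (d : PySem.Dict Int Int) (p : Int × Int) :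
    (pvMergeStep d p).keys = PySem.Set.add d.keys p.1 := by
  unfold pvMergeStep
  by_cases h : d.contains p.1
  · have hm : p.1 ∈ d.keys := (PySem.Dict.contains_iff_mem_keys d p.1).1 h
    simp [h, PySem.Dict.keys_modify, PySem.Dict.keys_insert_of_contains _ _ h,
      PySem.Set.add_of_mem hm]
  · have h' : d.contains p.1 = false := by simpa using h
    have hm : p.1 ∉ d.keys := fun hmem => by
      simp [(PySem.Dict.contains_iff_mem_keys d p.1).2 hmem] at h'
    simp [h', PySem.Dict.keys_insert_of_not_contains _ _ h', PySem.Set.add_of_not_mem hm]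

lemma pvMerge_foldl_keys (l : List (Int × Int)) (d : PySem.Dict Int Int) :
    (l.foldl pvMergeStep d).keys = PySem.Set.update d.keys (l.map (·.1)) := by
  induction l generalizing d with
  | nil => simp [PySem.Set.update]
  | cons p t ih => simp [List.foldl_cons, ih, pvMergeStep_keys, PySem.Set.update]

lemma pvFirst_loop (l : List (Int × Int)) (h : (l.map (·.1)).Nodup) :
    l.foldl (fun d p => d.insert p.1 p.2) (PySem.Dict.empty : PySem.Dict Int Int) = PySem.Dict.mk l := by
  apply PySem.Dict.ext
  have := PySem.Dict.items_foldl_insert_fresh (l := l) (k := (·.1)) (v := (·.2))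
    (d := PySem.Dict.empty) (by simp) h
  simpa using this

-- items of dict(l) for an association list l with distinct keys
lemma pvItems_ofList (l : List (Int × Int)) (h : (l.map (·.1)).Nodup) :
    (PySem.Dict.ofList l).items = l := by
  have := PySem.Dict.items_foldl_insert_fresh (l := l) (k := (·.1)) (v := (·.2))
    (d := PySem.Dict.empty) (by simp) h
  simp only [PySem.Dict.ofList, PySem.Dict.update]
  simpa using this

lemma pvSumIf_cons (p : Int × Int) (t : List (Int × Int)) (k : Int) :
    pvSumIf (p :: t) k = (if k = p.1 then p.2 else 0) + pvSumIf t k := by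
  simp [pvSumIf]

-- an association list with distinct keys is the map of its key list under its own per-key sum
lemma pvRepr (l : List (Int × Int)) (h : (l.map (·.1)).Nodup) :
    l = (l.map (·.1)).map (fun k => (k, pvSumIf l k)) := by
  induction l with
  | nil => simp
  | cons p t ih =>
      obtain ⟨i, v⟩ := p
      simp only [List.map_cons, List.nodup_cons] at h
      have hz : pvSumIf t i = 0 := pvSumIf_eq_zero_of_not_mem t i (by simpa using h.1)
      have hhead : pvSumIf ((i, v) :: t) i = v := by
        rw [pvSumIf_cons, if_pos rfl, hz]; ring
      have htail : (t.map (·.1)).map (fun k => (k, pvSumIf ((i, v) :: t) k))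
          = (t.map (·.1)).map (fun k => (k, pvSumIf t k)) := by
        refine List.map_congr_left (fun k hk => ?_)
        have hne : k ≠ i := fun he => h.1 (he ▸ hk)
        rw [pvSumIf_cons, if_neg (by simpa using hne), zero_add]
      simp only [List.map_cons]
      rw [hhead, htail, ← ih h.2]

-- key-sum through one scan step
lemma pvScanStep_sum (acc : List (Int × Int)) (p : Int × Int) (k : Int) :
    pvSumIf (pvScanStep acc p) k = pvSumIf acc k + (if k = p.1 then p.2 else 0) := by
  rcases List.eq_nil_or_concat' acc with rfl | ⟨dl, q, rfl⟩
  · simp [pvScanStep, pvSumIf]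
  · simp only [pvScanStep, List.getLast?_concat]
    by_cases hq : q.1 = p.1
    · simp only [hq, beq_self_eq_true, if_true, List.dropLast_concat]
      rw [pvSumIf_append, pvSumIf_append]
      by_cases hk : k = p.1 <;> simp [pvSumIf, hk, hq] <;> ring
    · have hb : (q.1 == p.1) = false := by simpa using hq
      simp only [hb, Bool.false_eq_true, if_false]
      rw [pvSumIf_append, pvSumIf_append]
      simp [pvSumIf]

lemma pvScan_foldl_sum (l : List (Int × Int)) (acc : List (Int × Int)) (k : Int) :
    pvSumIf (l.foldl pvScanStep acc) k = pvSumIf acc k + pvSumIf l k := by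
  induction l generalizing acc with
  | nil => simp [pvSumIf]
  | cons p t ih =>
      rw [List.foldl_cons, ih, pvScanStep_sum, pvSumIf_cons]
      ring

-- key membership through one scan step
lemma pvScanStep_mem (acc : List (Int × Int)) (p : Int × Int) (k : Int) :
    k ∈ (pvScanStep acc p).map (·.1) ↔ k ∈ acc.map (·.1) ∨ k = p.1 := by
  rcases List.eq_nil_or_concat' acc with rfl | ⟨dl, q, rfl⟩
  · simp [pvScanStep]
  · simp only [pvScanStep, List.getLast?_concat]
    by_cases hq : q.1 = p.1
    · simp only [hq, beq_self_eq_true, if_true, List.dropLast_concat]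
      simp [hq]
    · have hb : (q.1 == p.1) = false := by simpa using hq
      simp only [hb, Bool.false_eq_true, if_false]
      simp
      tauto

lemma pvScan_foldl_mem (l : List (Int × Int)) (acc : List (Int × Int)) (k : Int) :
    k ∈ (l.foldl pvScanStep acc).map (·.1) ↔ k ∈ acc.map (·.1) ∨ k ∈ l.map (·.1) := by
  induction l generalizing acc with
  | nil => simp
  | cons p t ih =>
      simp only [List.foldl_cons, ih, pvScanStep_mem, List.map_cons, List.mem_cons]
      tauto

-- strictly increasing keys through the scan
lemma pvScan_foldl_pairwise (l : List (Int × Int)) (acc : List (Int × Int))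
    (hacc : acc.Pairwise (fun a b => a.1 < b.1))
    (hl : l.Pairwise (fun a b => a.1 ≤ b.1))
    (hcross : ∀ p' ∈ l, ∀ a ∈ acc, a.1 ≤ p'.1) :
    (l.foldl pvScanStep acc).Pairwise (fun a b => a.1 < b.1) := by
  induction l generalizing acc with
  | nil => simpa using hacc
  | cons p t ih =>
      simp only [List.pairwise_cons] at hl
      simp only [List.foldl_cons]
      refine ih _ ?_ hl.2 ?_
      · -- pvScanStep acc p keeps keys strictly increasing
        rcases List.eq_nil_or_concat' acc with rfl | ⟨dl, q, rfl⟩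
        · simp [pvScanStep]
        · have hsplit := (List.pairwise_append.mp hacc)
          by_cases hq : q.1 = p.1
          · simp only [pvScanStep, List.getLast?_concat, hq, beq_self_eq_true, if_true,
              List.dropLast_concat]
            refine List.pairwise_append.mpr ⟨hsplit.1, by simp, ?_⟩
            intro a ha b hb
            simp at hb
            have := hsplit.2.2 a ha q (by simp)
            simp [hb, ← hq, this]
          · have hb : (q.1 == p.1) = false := by simpa using hq
            simp only [pvScanStep, List.getLast?_concat, hb, Bool.false_eq_true, if_false]
            have hqp : q.1 < p.1 :=
              lt_of_le_of_ne (hcross p (by simp) q (by simp)) hq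
            refine List.pairwise_append.mpr ⟨hacc, by simp, ?_⟩
            intro a ha b hb'
            simp at hb'
            rcases List.mem_append.mp ha with ha' | ha'
            · have := hsplit.2.2 a ha' q (by simp)
              simp [hb']; exact lt_trans this hqp
            · simp at ha'
              simp [hb', ha', hqp]
          --
      · intro p' hp' a ha
        have hmem : a.1 ∈ (pvScanStep acc p).map (·.1) := List.mem_map_of_mem ha
        rcases (pvScanStep_mem acc p a.1).mp hmem with hin | heq
        · obtain ⟨b, hb, hbe⟩ := List.mem_map.mp hin
          exact hbe ▸ hcross p (by simp) b hb |>.trans (hl.1 p' hp')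
        · exact heq ▸ hl.1 p' hp'

-- lexicographic order on pairs, as Python compares tuples
def pvLexLE (a b : Int × Int) : Prop := a.1 < b.1 ∨ (a.1 = b.1 ∧ a.2 ≤ b.2)

def pvBlex (a b : Int × Int) : Bool :=
  decide (a.1 < b.1) || (!decide (b.1 < a.1) && decide (a.2 < b.2))

lemma pvBlex_le {a b : Int × Int} (h : pvBlex a b = true) : pvLexLE a b := by
  simp [pvBlex] at h; unfold pvLexLE; omega

lemma pvBlex_not_le {a b : Int × Int} (h : ¬ pvBlex a b = true) : pvLexLE b a := by
  simp [pvBlex] at h; unfold pvLexLE; omega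

lemma pvLexLE_trans {a b c : Int × Int} (h1 : pvLexLE a b) (h2 : pvLexLE b c) : pvLexLE a c := by
  unfold pvLexLE at *; omega

lemma pvInsertBy_pairwise (x : Int × Int) (ys : List (Int × Int)) (h : ys.Pairwise pvLexLE) :
    (PySem.List.insertBy pvBlex x ys).Pairwise pvLexLE := by
  induction ys with
  | nil => simp [PySem.List.insertBy]
  | cons y t ih =>
      simp only [List.pairwise_cons] at h
      by_cases hb : pvBlex x y = true
      · have hxy := pvBlex_le hb
        simp only [PySem.List.insertBy, hb, if_true]
        exact List.Pairwise.cons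
          (by
            intro z hz
            rcases List.mem_cons.mp hz with rfl | hz
            · exact hxy
            · exact pvLexLE_trans hxy (h.1 z hz))
          (List.Pairwise.cons h.1 h.2)
      · have hyx := pvBlex_not_le hb
        simp only [PySem.List.insertBy, hb]
        exact List.Pairwise.cons
          (by
            intro z hz
            rcases (PySem.List.insertBy_mem_iff _ _ _ _).1 hz with rfl | hz
            · exact hyx
            · exact h.1 z hz)
          (ih h.2)

lemma pvSorted2_pairwise (xs : List (Int × Int)) :
    (PySem.List.sorted2 xs (·.1) (·.2) false).Pairwise pvLexLE := by
  show (xs.foldl (fun acc x => PySem.List.insertBy _ x acc) []).Pairwise pvLexLE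
  generalize hacc : ([] : List (Int × Int)) = acc
  have hp : acc.Pairwise pvLexLE := by simp [← hacc]
  clear hacc
  induction xs generalizing acc with
  | nil => simpa using hp
  | cons x t ih => exact ih _ (pvInsertBy_pairwise x acc hp)

lemma pvSorted2_eq (xs ys : List (Int × Int)) (hperm : ys.Perm xs)
    (hp : ys.Pairwise (fun a b => a.1 < b.1)) :
    PySem.List.sorted2 xs (·.1) (·.2) false = ys := by
  apply List.Perm.eq_of_pairwise (le := pvLexLE)
  · intro a b _ _ h1 h2; unfold pvLexLE at h1 h2
    have : a.1 = b.1 ∧ a.2 = b.2 := by omega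
    exact Prod.ext this.1 this.2
  · exact pvSorted2_pairwise xs
  · exact hp.imp (fun h => Or.inl h)
  · exact (PySem.List.sorted2_perm xs _ _ false).trans hperm.symm

-- ===== VERDICT (by name: the statement is the Claim_ definition above) =====
theorem add_signals_spec : Claim_equal_add_signals := by
  intro sa sb _ hpre
  obtain ⟨hka, hkb⟩ := hpre
  unfold Spec_add_signals
  simp only [add_signals, add_signals_alt]
  set da := sa.2.2 with hda
  set db := sb.2.2 with hdb
  have hfirst := pvFirst_loop da hka
  rw [hfirst]
  set dM : PySem.Dict Int Int := db.foldl pvMergeStep (PySem.Dict.mk da) with hdM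
  set f : Int → Int := fun k => (PySem.Dict.mk da).getD k 0 + (PySem.Dict.mk db).getD k 0 with hf
  -- === A side: combined2 = dict of L, where L = sorted keys paired with summed values ===
  have hkeys : dM.keys = PySem.Set.update (da.map (·.1)) (db.map (·.1)) := by
    rw [hdM, pvMerge_foldl_keys]; simp [PySem.Dict.keys_mk]
  have hknodup : dM.keys.Nodup := by
    rw [hkeys]; exact PySem.Set.nodup_update _ _ hka
  have hval : ∀ k, dM.getD k 0 = f k := by
    intro k
    rw [hdM, pvMerge_foldl_getD]
    simp only [hf]
    rw [pvMk_getD db k hkb]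
  set U' : List Int := PySem.List.sorted dM.keys (fun k => k) false with hU'
  have hU'perm : U'.Perm dM.keys := PySem.List.sorted_perm _ _ _
  have hU'nodup : U'.Nodup := hU'perm.nodup_iff.mpr hknodup
  have hU'lt : U'.Pairwise (· < ·) := by
    have hle : U'.Pairwise (fun a b => a ≤ b) := by
      simpa using PySem.List.sorted_pairwise dM.keys (fun k => k)
    have := hle.and (List.Pairwise.imp (fun h => h) hU'nodup)
    exact this.imp (fun ⟨h1, h2⟩ => lt_of_le_of_ne h1 h2)
  set L : List (Int × Int) := U'.map (fun k => (k, f k)) with hL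
  have hLfst : L.map (·.1) = U' := by simp [hL, Function.comp_def]
  have hLnodup : (L.map (·.1)).Nodup := by rw [hLfst]; exact hU'nodup
  have hitems : dM.items = dM.keys.map (fun k => (k, f k)) := by
    rw [PySem.Dict.items_eq_map_keys dM hknodup 0]
    exact List.map_congr_left (fun k _ => by rw [hval k])
  have hLperm : L.Perm dM.items := by
    rw [hitems, hL]; exact hU'perm.map _
  have hLpair : L.Pairwise (fun a b => a.1 < b.1) := by
    rw [hL, List.pairwise_map]; exact hU'lt
  have hsorted2 : PySem.List.sorted2 dM.items (·.1) (·.2) false = L :=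
    pvSorted2_eq dM.items L hLperm hLpair
  rw [hsorted2, pvItems_ofList L hLnodup]
  -- === B side: the scan over the sorted concatenation produces the same list L ===
  set P : List (Int × Int) := PySem.List.sorted2 (da ++ db) (·.1) (·.2) false with hP
  set X : List (Int × Int) := P.foldl pvScanStep [] with hX
  have hPperm : P.Perm (da ++ db) := PySem.List.sorted2_perm _ _ _ _
  have hPle : P.Pairwise (fun a b => a.1 ≤ b.1) :=
    (pvSorted2_pairwise (da ++ db)).imp (fun h => by unfold pvLexLE at h; omega)
  have hXlt : X.Pairwise (fun a b => a.1 < b.1) :=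
    pvScan_foldl_pairwise P [] (by simp) hPle (by simp)
  have hXnodup : (X.map (·.1)).Nodup :=
    (List.pairwise_map.mpr hXlt).imp (fun hlt => ne_of_lt hlt)
  have hXsum : ∀ k, pvSumIf X k = f k := by
    intro k
    rw [hX, pvScan_foldl_sum, pvSumIf_perm hPperm, pvSumIf_append]
    simp [pvSumIf, hf, pvMk_getD da k hka, pvMk_getD db k hkb]
  have hXmem : ∀ k, k ∈ X.map (·.1) ↔ k ∈ da.map (·.1) ∨ k ∈ db.map (·.1) := by
    intro k
    rw [hX, pvScan_foldl_mem]
    have : k ∈ P.map (·.1) ↔ k ∈ (da ++ db).map (·.1) := by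
      constructor <;> intro h
      · exact (hPperm.map (·.1)).mem_iff.mp h
      · exact (hPperm.map (·.1)).mem_iff.mpr h
    simp only [List.map_nil, List.not_mem_nil, false_or]
    rw [this]; simp
  have hLmem : ∀ k, k ∈ L.map (·.1) ↔ k ∈ da.map (·.1) ∨ k ∈ db.map (·.1) := by
    intro k
    rw [hLfst, hU']
    rw [PySem.List.mem_sorted, hkeys, PySem.Set.mem_update]
  have hkeysperm : (X.map (·.1)).Perm (L.map (·.1)) := by
    rw [List.perm_ext_iff_of_nodup hXnodup hLnodup]
    intro a; rw [hXmem a, hLmem a]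
  have hXL : X = L := by
    have hXrepr : X = (X.map (·.1)).map (fun k => (k, f k)) := by
      conv_lhs => rw [pvRepr X hXnodup]
      exact List.map_congr_left (fun k _ => by rw [hXsum k])
    have hpermXL : X.Perm L := by
      rw [hXrepr, hL]; exact hkeysperm.map _ |>.trans (by rw [hLfst])
    apply List.Perm.eq_of_pairwise (le := fun a b : Int × Int => a.1 < b.1)
    · intro a b _ _ h1 h2; omega
    · exact hXlt
    · exact hLpair
    · exact hpermXL
  rw [hXL, pvItems_ofList L hLnodup]
  have hI := pvItems_ofList L hLnodup
  simp [PySem.Dict.keys, PySem.Dict.values, hI]
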